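-- pv_equiv track=rewrite | github.com/VaraSamuel/signalstay | backend/app/services/property_context_service.py | _select_signature_amenity
-- ===== SOURCE A (Python) =====
-- from typing import Any, Dict, List, Optional
--
-- GENERIC_AMENITIES = {
--     "ac",
--     "internet",
--     "wifi",
--     "wi-fi",
--     "tv",
--     "housekeeping",
--     "restaurant",
--     "bar",
--     "no_smoking",
--     "outdoor_space",
--     "frontdesk_24_hour",
-- }
--
-- AMENITY_PRIORITY = [
--     ("free parking", ["free parking", "parking included"]),
--     ("breakfast included", ["breakfast included", "free buffet breakfast"]),
--     ("pool", ["pool", "indoor pool", "outdoor pool"]),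
--     ("gym", ["gym", "fitness", "fitness center"]),
--     ("spa", ["spa", "wellness"]),
--     ("airport shuttle", ["airport shuttle", "shuttle"]),
--     ("pet friendly", ["pet friendly", "pets allowed"]),
--     ("beach access", ["beach", "beachfront"]),
-- ]
--
-- def _select_signature_amenity(amenities: List[str]) -> Optional[str]:
--     lowered = [a.lower() for a in amenities]
--
--     for label, variants in AMENITY_PRIORITY:
--         if any(any(v in item for v in variants) for item in lowered):
--             return label
--
--     for amenity in amenities:
--         a = amenity.lower().strip()
--         if a in GENERIC_AMENITIES or len(a) < 4:
--             continue
--         return amenity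
--
--     return None
-- ===== SOURCE B (Python) =====
-- from typing import List, Optional
--
-- GENERIC_AMENITIES = {
--     "ac",
--     "internet",
--     "wifi",
--     "wi-fi",
--     "tv",
--     "housekeeping",
--     "restaurant",
--     "bar",
--     "no_smoking",
--     "outdoor_space",
--     "frontdesk_24_hour",
-- }
--
-- AMENITY_PRIORITY = [
--     ("free parking", ["free parking", "parking included"]),
--     ("breakfast included", ["breakfast included", "free buffet breakfast"]),
--     ("pool", ["pool", "indoor pool", "outdoor pool"]),
--     ("gym", ["gym", "fitness", "fitness center"]),
--     ("spa", ["spa", "wellness"]),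
--     ("airport shuttle", ["airport shuttle", "shuttle"]),
--     ("pet friendly", ["pet friendly", "pets allowed"]),
--     ("beach access", ["beach", "beachfront"]),
-- ]
--
--
-- def _rank(item: str) -> int:
--     # index of the first priority group the lowered amenity matches, len(AMENITY_PRIORITY) if none
--     r = 0
--     for _, variants in AMENITY_PRIORITY:
--         if any(v in item for v in variants):
--             break
--         r += 1
--     return r
--
--
-- def _select_signature_amenity(amenities: List[str]) -> Optional[str]:
--     # Single pass: each amenity gets a numeric rank (index of the first priority
--     # group it matches); we keep the running minimum rank and, in the same pass,
--     # the first acceptable fallback amenity. At the end the minimum rank indexes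
--     # AMENITY_PRIORITY; if no amenity matched any group, the fallback is used.
--     best = len(AMENITY_PRIORITY)
--     fallback = None
--     for amenity in amenities:
--         item = amenity.lower()
--         r = _rank(item)
--         if r < best:
--             best = r
--         if fallback is None:
--             a = item.strip()
--             if not (a in GENERIC_AMENITIES or len(a) < 4):
--                 fallback = amenity
--     if best < len(AMENITY_PRIORITY):
--         return AMENITY_PRIORITY[best][0]
--     return fallback
-- ===== Notes on version B (the rewrite author's own statement) =====
-- stated objective: alternative
-- what changed: B reduces the task to a minimum computation: each amenity is mapped to a numeric rank (index of the first priority group it matches, len if none) and one pass keeps the running minimum rank together with the first acceptable fallback amenity; the answer is AMENITY_PRIORITY[min_rank] or the fallback, replacing A's per-group rescans of the list plus a separate fallback loop.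
import Mathlib
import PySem

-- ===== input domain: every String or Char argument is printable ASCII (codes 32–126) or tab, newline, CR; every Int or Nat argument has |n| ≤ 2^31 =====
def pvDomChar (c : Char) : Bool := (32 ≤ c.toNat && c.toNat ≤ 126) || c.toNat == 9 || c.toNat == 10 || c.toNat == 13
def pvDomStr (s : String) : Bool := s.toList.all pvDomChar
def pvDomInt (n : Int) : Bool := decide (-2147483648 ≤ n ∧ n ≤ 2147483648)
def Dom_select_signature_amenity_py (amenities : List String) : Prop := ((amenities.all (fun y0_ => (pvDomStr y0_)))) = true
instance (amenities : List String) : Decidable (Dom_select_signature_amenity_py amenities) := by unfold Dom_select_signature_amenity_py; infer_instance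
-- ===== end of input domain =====

-- B maps each amenity to a numeric rank (index of the first priority group it matches) and takes
-- one pass keeping the minimum rank and the first fallback candidate, instead of A's per-group
-- rescans of the list plus a separate fallback loop (objective: alternative).

-- shared module constants (identical in Source A and Source B)
def pvGenericAmenities : PySem.Set String :=
  PySem.Set.ofList ["ac", "internet", "wifi", "wi-fi", "tv", "housekeeping", "restaurant",
    "bar", "no_smoking", "outdoor_space", "frontdesk_24_hour"]

def pvAmenityPriority : List (String × List String) :=
  [("free parking", ["free parking", "parking included"]),
   ("breakfast included", ["breakfast included", "free buffet breakfast"]),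
   ("pool", ["pool", "indoor pool", "outdoor pool"]),
   ("gym", ["gym", "fitness", "fitness center"]),
   ("spa", ["spa", "wellness"]),
   ("airport shuttle", ["airport shuttle", "shuttle"]),
   ("pet friendly", ["pet friendly", "pets allowed"]),
   ("beach access", ["beach", "beachfront"])]

-- ===== PORT A =====
-- A's priority loop: for each group in order, scan the whole lowered list for any variant hit.
def pvFindPriority : List (String × List String) → List String → Option String
  | [], _ => none
  | (label, variants) :: rest, lowered =>
    if lowered.any (fun item => variants.any (fun v => PySem.Str.isIn v item))
    then some label else pvFindPriority rest lowered

-- A's fallback loop: first original-cased amenity that is non-generic and has stripped length >= 4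
def pvFallback : List String → Option String
  | [] => none
  | amenity :: rest =>
    let a := PySem.Str.strip (PySem.Str.lower amenity)
    if PySem.Set.contains pvGenericAmenities a || PySem.Str.len a < 4 then pvFallback rest
    else some amenity

def select_signature_amenity_py (amenities : List String) : Option String :=
  let lowered := amenities.map PySem.Str.lower
  match pvFindPriority pvAmenityPriority lowered with
  | some l => some l
  | none => pvFallback amenities

-- ===== PORT B =====
-- _rank: index of the first priority group the lowered item matches, length if none
def pvRank : List (String × List String) → String → Nat
  | [], _ => 0
  | g :: rest, item =>
    if g.2.any (fun v => PySem.Str.isIn v item) then 0 else pvRank rest item + 1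

-- one iteration of B's single loop: state = (best rank so far, first fallback candidate)
def pvStep (st : Nat × Option String) (amenity : String) : Nat × Option String :=
  let item := PySem.Str.lower amenity
  let r := pvRank pvAmenityPriority item
  let best := if r < st.1 then r else st.1
  let fb := match st.2 with
    | some s => some s
    | none =>
      let a := PySem.Str.strip item
      if PySem.Set.contains pvGenericAmenities a || PySem.Str.len a < 4 then none
      else some amenity
  (best, fb)

def select_signature_amenity_py_alt (amenities : List String) : Option String :=
  let st := amenities.foldl pvStep (pvAmenityPriority.length, none)
  if st.1 < pvAmenityPriority.length then
    (PySem.List.pyGet? pvAmenityPriority (st.1 : Int)).map Prod.fst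
  else st.2

-- ===== PRECONDITION & SPEC =====
def Spec_select_signature_amenity_py (amenities : List String) (out : Option String) : Prop := out = select_signature_amenity_py_alt amenities
instance (amenities : List String) (out : Option String) : Decidable (Spec_select_signature_amenity_py amenities out) := by unfold Spec_select_signature_amenity_py; infer_instance

-- ===== CLAIM (what is proved, stated in full; the proofs are below) =====
def Claim_equal_select_signature_amenity_py : Prop := ∀ (amenities : List String), Dom_select_signature_amenity_py amenities → Spec_select_signature_amenity_py amenities (select_signature_amenity_py amenities)

-- ===== LEMMAS AND PROOFS =====

-- the minimum rank over a lowered list, as B's loop computes it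
def pvMinRank (G : List (String × List String)) (L : List String) : Nat :=
  L.foldl (fun b item => min (pvRank G item) b) G.length

theorem pv_foldl_min_le (f : String → Nat) :
    ∀ (L : List String) (b : Nat), L.foldl (fun b x => min (f x) b) b ≤ b := by
  intro L
  induction L with
  | nil => intro b; simp
  | cons a L ih =>
    intro b
    calc (a :: L).foldl (fun b x => min (f x) b) b
        = L.foldl (fun b x => min (f x) b) (min (f a) b) := rfl
      _ ≤ min (f a) b := ih _
      _ ≤ b := Nat.min_le_right _ _

theorem pv_foldl_min_zero (f : String → Nat) :
    ∀ (L : List String) (b : Nat) (x : String), x ∈ L → f x = 0 →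
      L.foldl (fun b x => min (f x) b) b = 0 := by
  intro L
  induction L with
  | nil => intro b x hx; simp at hx
  | cons a L ih =>
    intro b x hx hfx
    rcases List.mem_cons.mp hx with rfl | hx
    · simp only [List.foldl_cons]
      have h1 := pv_foldl_min_le f L (min (f x) b)
      have h2 : min (f x) b = 0 := by omega
      omega
    · exact ih _ x hx hfx

theorem pv_foldl_min_succ (f g : String → Nat) :
    ∀ (L : List String), (∀ x ∈ L, f x = g x + 1) →
      ∀ b : Nat, L.foldl (fun b x => min (f x) b) (b + 1)
        = L.foldl (fun b x => min (g x) b) b + 1 := by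
  intro L
  induction L with
  | nil => intro _ b; simp
  | cons a L ih =>
    intro h b
    have ha : f a = g a + 1 := h a (List.mem_cons_self ..)
    have hmin : min (f a) (b + 1) = min (g a) b + 1 := by rw [ha]; omega
    simp only [List.foldl_cons, hmin]
    exact ih (fun x hx => h x (List.mem_cons_of_mem _ hx)) _

-- A's staged group scans compute exactly the label at B's minimum rank
theorem pv_find_eq (G : List (String × List String)) (L : List String) :
    pvFindPriority G L = (G[pvMinRank G L]?).map Prod.fst := by
  induction G with
  | nil => simp [pvFindPriority]
  | cons g rest ih =>
    obtain ⟨label, variants⟩ := g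
    by_cases h : L.any (fun item => variants.any (fun v => PySem.Str.isIn v item)) = true
    · obtain ⟨x, hx, hmatch⟩ := List.any_eq_true.mp h
      have hrk : pvRank ((label, variants) :: rest) x = 0 := by
        show (if variants.any (fun v => PySem.Str.isIn v x) then 0
              else pvRank rest x + 1) = 0
        rw [if_pos hmatch]
      have hm : pvMinRank ((label, variants) :: rest) L = 0 :=
        pv_foldl_min_zero _ L _ x hx hrk
      show (if L.any (fun item => variants.any (fun v => PySem.Str.isIn v item))
            then some label else pvFindPriority rest L)
          = (((label, variants) :: rest)[pvMinRank ((label, variants) :: rest) L]?).map Prod.fst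
      rw [if_pos h, hm]
      rfl
    · have hall : ∀ x ∈ L, pvRank ((label, variants) :: rest) x = pvRank rest x + 1 := by
        intro x hx
        have hnx : ¬ variants.any (fun v => PySem.Str.isIn v x) = true := by
          intro hc; exact h (List.any_eq_true.mpr ⟨x, hx, hc⟩)
        show (if variants.any (fun v => PySem.Str.isIn v x) then 0
              else pvRank rest x + 1) = pvRank rest x + 1
        rw [if_neg hnx]
      have hm : pvMinRank ((label, variants) :: rest) L = pvMinRank rest L + 1 := by
        unfold pvMinRank
        exact pv_foldl_min_succ _ _ L hall rest.length
      show (if L.any (fun item => variants.any (fun v => PySem.Str.isIn v item))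
            then some label else pvFindPriority rest L)
          = (((label, variants) :: rest)[pvMinRank ((label, variants) :: rest) L]?).map Prod.fst
      rw [if_neg h, hm, ih]
      simp

-- B's fold: once the fallback slot is filled it stays filled
theorem pv_fold_fb_some :
    ∀ (xs : List String) (b : Nat) (s : String),
      (xs.foldl pvStep (b, some s)).2 = some s := by
  intro xs
  induction xs with
  | nil => intros; rfl
  | cons x xs ih => intro b s; simpa [List.foldl_cons, pvStep] using ih _ s

-- B's fallback slot computes A's fallback loop
theorem pv_fold_fb_none :
    ∀ (xs : List String) (b : Nat),
      (xs.foldl pvStep (b, none)).2 = pvFallback xs := by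
  intro xs
  induction xs with
  | nil => intro b; rfl
  | cons x xs ih =>
    intro b
    by_cases hc : (PySem.Set.contains pvGenericAmenities (PySem.Str.strip (PySem.Str.lower x))
        || PySem.Str.len (PySem.Str.strip (PySem.Str.lower x)) < 4) = true
    · simp only [List.foldl_cons, pvStep, pvFallback, hc, if_true]
      exact ih _
    · simp only [List.foldl_cons, pvStep, pvFallback]
      rw [if_neg hc, if_neg hc]
      exact pv_fold_fb_some xs _ x

-- B's best slot computes the running minimum of the ranks
theorem pv_fold_best :
    ∀ (xs : List String) (b : Nat) (fb : Option String),
      (xs.foldl pvStep (b, fb)).1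
        = xs.foldl (fun b x => min (pvRank pvAmenityPriority (PySem.Str.lower x)) b) b := by
  intro xs
  induction xs with
  | nil => intros; rfl
  | cons x xs ih =>
    intro b fb
    have hmin : (if pvRank pvAmenityPriority (PySem.Str.lower x) < b
        then pvRank pvAmenityPriority (PySem.Str.lower x) else b)
        = min (pvRank pvAmenityPriority (PySem.Str.lower x)) b := by
      rw [Nat.min_def]; split_ifs <;> omega
    simp only [List.foldl_cons, pvStep, hmin]
    exact ih _ _

-- ===== VERDICT (by name: the statement is the Claim_ definition above) =====
theorem select_signature_amenity_py_spec : Claim_equal_select_signature_amenity_py := by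
  intro amenities _
  show select_signature_amenity_py amenities = select_signature_amenity_py_alt amenities
  show (match pvFindPriority pvAmenityPriority (amenities.map PySem.Str.lower) with
        | some l => some l
        | none => pvFallback amenities)
      = (if (amenities.foldl pvStep (pvAmenityPriority.length, none)).1 < pvAmenityPriority.length
         then (PySem.List.pyGet? pvAmenityPriority
                (((amenities.foldl pvStep (pvAmenityPriority.length, none)).1 : Nat) : Int)).map Prod.fst
         else (amenities.foldl pvStep (pvAmenityPriority.length, none)).2)
  have hbest : (amenities.foldl pvStep (pvAmenityPriority.length, none)).1
      = pvMinRank pvAmenityPriority (amenities.map PySem.Str.lower) := by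
    rw [pv_fold_best]
    unfold pvMinRank
    rw [List.foldl_map]
  have hle : pvMinRank pvAmenityPriority (amenities.map PySem.Str.lower)
      ≤ pvAmenityPriority.length := pv_foldl_min_le _ _ _
  rw [pv_find_eq, hbest, PySem.List.pyGet?_natCast]
  by_cases h : pvMinRank pvAmenityPriority (amenities.map PySem.Str.lower)
      < pvAmenityPriority.length
  · rw [if_pos h, List.getElem?_eq_getElem h]
    rfl
  · rw [if_neg h]
    have hm : pvMinRank pvAmenityPriority (amenities.map PySem.Str.lower)
        = pvAmenityPriority.length := by omega
    rw [hm, List.getElem?_eq_none (by omega)]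
    exact (pv_fold_fb_none amenities _).symm
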